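-- pv_equiv track=rewrite | github.com/IzumovaD/WF-software-support | wf_software_support.py | count_diffs
-- ===== SOURCE A (Python) =====
-- def count_diffs(morph1, morph2):
--     temp1 = list(morph1)
--     temp2 = list(morph2)
--     count = 0
--     if len(temp1) <= len(temp2):
--         count += len(temp2) - len(temp1)
--         for elem in temp1:
--             if elem in temp2:
--                 temp2.remove(elem)
--             else:
--                 count += 1
--     else:
--         count = count_diffs(temp2, temp1)
--     return count
-- ===== SOURCE B (Python) =====
-- def count_diffs(morph1, morph2):
--     a = sorted(morph1)
--     b = sorted(morph2)
--     i = j = matches = 0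
--     while i < len(a) and j < len(b):
--         if a[i] == b[j]:
--             matches += 1
--             i += 1
--             j += 1
--         elif a[i] < b[j]:
--             i += 1
--         else:
--             j += 1
--     return max(len(a), len(b)) - matches
-- ===== Notes on version B (the rewrite author's own statement) =====
-- stated objective: faster
-- what changed: Replaces A's per-element membership test and remove() scans (and the swap recursion) by sorting both sequences once and counting multiset matches in a single two-pointer merge, returning max(len1,len2) - matches.
import Mathlib
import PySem

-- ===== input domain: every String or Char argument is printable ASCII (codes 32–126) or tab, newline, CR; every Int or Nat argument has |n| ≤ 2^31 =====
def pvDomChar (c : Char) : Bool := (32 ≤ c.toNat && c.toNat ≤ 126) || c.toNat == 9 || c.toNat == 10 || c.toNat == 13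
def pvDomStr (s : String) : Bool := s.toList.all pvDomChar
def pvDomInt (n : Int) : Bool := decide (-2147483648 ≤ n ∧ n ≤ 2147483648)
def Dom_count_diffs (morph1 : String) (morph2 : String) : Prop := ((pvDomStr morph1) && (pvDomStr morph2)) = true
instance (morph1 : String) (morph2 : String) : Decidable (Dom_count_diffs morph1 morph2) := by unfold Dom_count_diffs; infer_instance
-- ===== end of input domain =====

-- B replaces A's repeated membership/remove scans by sort-then-merge match counting; total, return value only.

-- ===== PORT A =====
-- 'temp2.remove(elem)' is guarded by 'elem in temp2', so it is exactly List.erase (first occurrence).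
def count_diffs_core (t1 t2 : List Char) : Int :=
  if t1.length ≤ t2.length then
    (t1.foldl (fun (s : List Char × Int) elem =>
        if elem ∈ s.1 then (s.1.erase elem, s.2) else (s.1, s.2 + 1))
      (t2, ((t2.length : Int) - (t1.length : Int)))).2
  else count_diffs_core t2 t1
termination_by (if t1.length ≤ t2.length then 0 else 1)
decreasing_by split_ifs <;> omega

def count_diffs (morph1 : String) (morph2 : String) : Int :=
  count_diffs_core morph1.toList morph2.toList

-- ===== PORT B =====
-- two-pointer merge of the two sorted lists, counting equal pairs (Source B's while loop)
def mergeCount : List Char → List Char → Int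
  | [], _ => 0
  | _ :: _, [] => 0
  | x :: xs, y :: ys =>
    if x = y then mergeCount xs ys + 1
    else if x < y then mergeCount xs (y :: ys)
    else mergeCount (x :: xs) ys
termination_by a b => a.length + b.length

def count_diffs_alt (morph1 : String) (morph2 : String) : Int :=
  ((max (PySem.List.sorted morph1.toList (fun c => c)).length
        (PySem.List.sorted morph2.toList (fun c => c)).length : Nat) : Int)
    - mergeCount (PySem.List.sorted morph1.toList (fun c => c))
                 (PySem.List.sorted morph2.toList (fun c => c))

-- ===== PRECONDITION & SPEC =====
def Spec_count_diffs (morph1 : String) (morph2 : String) (out : Int) : Prop := out = count_diffs_alt morph1 morph2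
instance (morph1 : String) (morph2 : String) (out : Int) : Decidable (Spec_count_diffs morph1 morph2 out) := by unfold Spec_count_diffs; infer_instance

-- ===== CLAIM (what is proved, stated in full; the proofs are below) =====
def Claim_equal_count_diffs : Prop := ∀ (morph1 : String) (morph2 : String), Dom_count_diffs morph1 morph2 → Spec_count_diffs morph1 morph2 (count_diffs morph1 morph2)

-- ===== LEMMAS AND PROOFS =====

-- A's matching loop counts exactly the multiset-intersection matches
lemma foldA_eq (t1 : List Char) : ∀ (t2 : List Char) (c : Int),
    (t1.foldl (fun (s : List Char × Int) elem =>
        if elem ∈ s.1 then (s.1.erase elem, s.2) else (s.1, s.2 + 1)) (t2, c)).2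
      = c + t1.length - ((↑t1 ∩ ↑t2 : Multiset Char)).card := by
  induction t1 with
  | nil => intro t2 c; simp
  | cons x xs ih =>
    intro t2 c
    by_cases hx : x ∈ t2
    · have hms : x ∈ (↑t2 : Multiset Char) := by simpa using hx
      simp only [List.foldl_cons, if_pos hx, ih]
      rw [show ((↑(x :: xs) : Multiset Char)) = x ::ₘ ↑xs from rfl,
          Multiset.cons_inter_of_pos _ hms, Multiset.coe_erase]
      simp only [Multiset.card_cons]
      push_cast [List.length_cons]
      ring
    · have hms : x ∉ (↑t2 : Multiset Char) := by simpa using hx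
      simp only [List.foldl_cons, if_neg hx, ih]
      rw [show ((↑(x :: xs) : Multiset Char)) = x ::ₘ ↑xs from rfl,
          Multiset.cons_inter_of_neg _ hms]
      push_cast [List.length_cons]
      ring

lemma count_diffs_core_eq (t1 t2 : List Char) :
    count_diffs_core t1 t2
      = (max t1.length t2.length : Int) - ((↑t1 ∩ ↑t2 : Multiset Char)).card := by
  rw [count_diffs_core.eq_def]
  by_cases h : t1.length ≤ t2.length
  · rw [if_pos h, foldA_eq]
    rw [max_eq_right (by exact_mod_cast h : (t1.length : Int) ≤ (t2.length : Int))]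
    ring
  · rw [if_neg h, count_diffs_core.eq_def, if_pos (by omega), foldA_eq,
        Multiset.inter_comm]
    rw [max_eq_left (by exact_mod_cast Nat.le_of_lt (Nat.lt_of_not_le h) : (t2.length : Int) ≤ (t1.length : Int))]
    ring

-- the merge over sorted lists counts the multiset intersection
lemma mergeCount_eq : ∀ (a b : List Char),
    a.Pairwise (· ≤ ·) → b.Pairwise (· ≤ ·) →
    mergeCount a b = ((↑a ∩ ↑b : Multiset Char)).card := by
  intro a b
  induction a, b using mergeCount.induct with
  | case1 b => intro _ _; simp [mergeCount]
  | case2 x xs => intro _ _; simp [mergeCount]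
  | case3 xs y ys ih =>
    intro ha hb
    have hm : y ∈ (↑(y :: ys) : Multiset Char) := by simp
    have key : (↑(y :: xs) ∩ ↑(y :: ys) : Multiset Char) = y ::ₘ (↑xs ∩ ↑ys) := by
      rw [show ((↑(y :: xs) : Multiset Char)) = y ::ₘ ↑xs from rfl,
          Multiset.cons_inter_of_pos _ hm]
      simp
    rw [mergeCount, if_pos rfl, key,
        ih (List.Pairwise.of_cons ha) (List.Pairwise.of_cons hb)]
    simp
  | case4 x xs y ys hne hlt ih =>
    intro ha hb
    have hx : x ∉ (↑(y :: ys) : Multiset Char) := by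
      simp only [Multiset.mem_coe, List.mem_cons]
      rintro (rfl | hmem)
      · exact hne rfl
      · exact absurd (lt_of_lt_of_le hlt ((List.pairwise_cons.mp hb).1 _ hmem)) (lt_irrefl x)
    have key : (↑(x :: xs) ∩ ↑(y :: ys) : Multiset Char) = ↑xs ∩ ↑(y :: ys) := by
      rw [show ((↑(x :: xs) : Multiset Char)) = x ::ₘ ↑xs from rfl,
          Multiset.cons_inter_of_neg _ hx]
    rw [mergeCount, if_neg hne, if_pos hlt, key,
        ih (List.Pairwise.of_cons ha) hb]
  | case5 x xs y ys hne hnlt ih =>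
    intro ha hb
    have hylt : y < x := by
      rcases lt_trichotomy x y with h | h | h
      · exact absurd h hnlt
      · exact absurd h hne
      · exact h
    have hy : y ∉ (↑(x :: xs) : Multiset Char) := by
      simp only [Multiset.mem_coe, List.mem_cons]
      rintro (rfl | hmem)
      · exact absurd hylt (lt_irrefl y)
      · exact absurd (lt_of_lt_of_le hylt ((List.pairwise_cons.mp ha).1 _ hmem)) (lt_irrefl y)
    have key : (↑(x :: xs) ∩ ↑(y :: ys) : Multiset Char) = ↑(x :: xs) ∩ ↑ys := by
      rw [Multiset.inter_comm,
          show ((↑(y :: ys) : Multiset Char)) = y ::ₘ ↑ys from rfl,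
          Multiset.cons_inter_of_neg _ hy, Multiset.inter_comm]
    rw [mergeCount, if_neg hne, if_neg hnlt, key,
        ih ha (List.Pairwise.of_cons hb)]

-- ===== VERDICT (by name: the statement is the Claim_ definition above) =====
theorem count_diffs_spec : Claim_equal_count_diffs := by
  intro m1 m2 _
  unfold Spec_count_diffs count_diffs count_diffs_alt
  set t1 := m1.toList
  set t2 := m2.toList
  have hp1 := PySem.List.sorted_perm t1 (fun c => c) false
  have hp2 := PySem.List.sorted_perm t2 (fun c => c) false
  have hs1 : (↑(PySem.List.sorted t1 (fun c => c)) : Multiset Char) = ↑t1 :=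
    Multiset.coe_eq_coe.mpr hp1
  have hs2 : (↑(PySem.List.sorted t2 (fun c => c)) : Multiset Char) = ↑t2 :=
    Multiset.coe_eq_coe.mpr hp2
  rw [count_diffs_core_eq,
      mergeCount_eq _ _ (PySem.List.sorted_pairwise t1 (fun c => c))
        (PySem.List.sorted_pairwise t2 (fun c => c)),
      hs1, hs2, hp1.length_eq, hp2.length_eq]
  push_cast
  ring
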